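-- pv_equiv track=rewrite | github.com/philippschenk2000/gpr | old scripts/main_analysis_price.py | product_classifiing1
-- ===== SOURCE A (Python) =====
-- def product_classifiing1(apple_offers):
--
--     main_product_class = []
--     for i in apple_offers['titles']:
--         i = i.lower()
--         if 'phon' in i:
--             main_product_class.append('iphone')
--         elif 'pod' in i:
--             main_product_class.append('airpods')
--         elif 'pad' in i:
--             main_product_class.append('ipad')
--         elif 'book' in i:
--             main_product_class.append('macbook')
--         elif 'mac' in i:
--             main_product_class.append('mac')
--         elif 'watch' in i:
--             main_product_class.append('watch')
--         else:
--             main_product_class.append('other')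
--     apple_offers['product'] = main_product_class
--
--     return apple_offers
-- ===== SOURCE B (Python) =====
-- def product_classifiing1(apple_offers):
--     # Rule-major sweep: begin with every title labelled 'other', then apply the
--     # rules in reverse priority order, overwriting on match (last write wins,
--     # so the highest-priority matching rule determines the final label).
--     titles = [t.lower() for t in apple_offers['titles']]
--     labels = ['other'] * len(titles)
--     for sub, label in [('watch', 'watch'), ('mac', 'mac'), ('book', 'macbook'),
--                        ('pad', 'ipad'), ('pod', 'airpods'), ('phon', 'iphone')]:
--         for k, t in enumerate(titles):
--             if sub in t:
--                 labels[k] = label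
--     apple_offers['product'] = labels
--     return apple_offers
-- ===== Notes on version B (the rewrite author's own statement) =====
-- stated objective: alternative
-- what changed: Replaces the per-title first-match if/elif chain by a rule-major algorithm: all titles start as 'other' and each rule, taken in reverse priority order, sweeps the whole title list and overwrites labels on match (last write wins).
import Mathlib
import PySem

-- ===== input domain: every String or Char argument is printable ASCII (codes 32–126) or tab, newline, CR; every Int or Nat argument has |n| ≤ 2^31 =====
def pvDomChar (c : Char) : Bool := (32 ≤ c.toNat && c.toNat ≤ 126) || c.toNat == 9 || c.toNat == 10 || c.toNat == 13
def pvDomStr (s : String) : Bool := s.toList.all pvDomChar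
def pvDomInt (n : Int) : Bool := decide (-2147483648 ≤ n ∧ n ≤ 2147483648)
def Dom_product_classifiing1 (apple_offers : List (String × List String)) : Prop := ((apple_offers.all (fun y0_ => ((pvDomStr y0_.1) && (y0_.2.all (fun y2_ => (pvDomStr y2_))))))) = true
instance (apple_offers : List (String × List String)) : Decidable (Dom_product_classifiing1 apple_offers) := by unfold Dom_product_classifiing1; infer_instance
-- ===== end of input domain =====

-- B replaces the per-title first-match if/elif chain by a rule-major sweep: all labels start
-- as 'other' and each rule, in reverse priority order, overwrites matching positions (last
-- write wins). Both Pythons mutate the argument dict in place (adding/overwriting 'product');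
-- the theorems are about the returned dict.

-- ===== PORT A =====
def product_classifiing1 (apple_offers : List (String × List String)) : List (String × List String) :=
  let d := PySem.Dict.mk apple_offers
  let titles := (d.get? "titles").getD []
  let main_product_class := titles.foldl (fun acc i =>
    let i := PySem.Str.lower i
    acc ++ [if PySem.Str.isIn "phon" i then "iphone"
            else if PySem.Str.isIn "pod" i then "airpods"
            else if PySem.Str.isIn "pad" i then "ipad"
            else if PySem.Str.isIn "book" i then "macbook"
            else if PySem.Str.isIn "mac" i then "mac"
            else if PySem.Str.isIn "watch" i then "watch"
            else "other"]) []
  (d.insert "product" main_product_class).items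

-- ===== PORT B =====
def pvRulesRev : List (String × String) :=
  [("watch", "watch"), ("mac", "mac"), ("book", "macbook"),
   ("pad", "ipad"), ("pod", "airpods"), ("phon", "iphone")]

-- one sweep of 'for k, t in enumerate(titles): if sub in t: labels[k] = label'
-- (positionwise update of labels, driven by the title at the same index)
def pvSweep (sub label : String) (labels titles : List String) : List String :=
  (labels.zip titles).map (fun p => if PySem.Str.isIn sub p.2 then label else p.1)

def product_classifiing1_alt (apple_offers : List (String × List String)) : List (String × List String) :=
  let d := PySem.Dict.mk apple_offers
  let titles := ((d.get? "titles").getD []).map PySem.Str.lower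
  let labels := titles.map (fun _ => "other")
  let labels := pvRulesRev.foldl (fun labels sl => pvSweep sl.1 sl.2 labels titles) labels
  (d.insert "product" labels).items

-- ===== PRECONDITION & SPEC =====
-- Pre_: the Python A raises KeyError when the dict has no 'titles' key; exactly those inputs
-- are excluded (B raises there too).
def Pre_product_classifiing1 (apple_offers : List (String × List String)) : Prop :=
  "titles" ∈ apple_offers.map (·.1)
instance (apple_offers : List (String × List String)) : Decidable (Pre_product_classifiing1 apple_offers) := by unfold Pre_product_classifiing1; infer_instance

def pvWitness_product_classifiing1 : (List (String × List String)) := [("titles", ["iPhone 12", "dock"])]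

def Spec_product_classifiing1 (apple_offers : List (String × List String)) (out : List (String × List String)) : Prop := out = product_classifiing1_alt apple_offers
instance (apple_offers : List (String × List String)) (out : List (String × List String)) : Decidable (Spec_product_classifiing1 apple_offers out) := by unfold Spec_product_classifiing1; infer_instance

-- ===== CLAIM (what is proved, stated in full; the proofs are below) =====
def Claim_equal_product_classifiing1 : Prop := ∀ (apple_offers : List (String × List String)), Dom_product_classifiing1 apple_offers → Pre_product_classifiing1 apple_offers → Spec_product_classifiing1 apple_offers (product_classifiing1 apple_offers)

-- ===== LEMMAS AND PROOFS =====

-- a sweep applied to a label list that is pointwise a function of the titles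
-- fuses into one map over the titles
theorem pvSweep_map (sub label : String) (f : String → String) (ts : List String) :
    pvSweep sub label (ts.map f) ts
      = ts.map (fun t => if PySem.Str.isIn sub t then label else f t) := by
  induction ts with
  | nil => rfl
  | cons t ts ih =>
      simp only [pvSweep] at ih ⊢
      simp only [List.map_cons, List.zip_cons_cons, List.map]
      exact congrArg (List.cons _) ih

-- ===== VERDICT (by name: the statement is the Claim_ definition above) =====
theorem product_classifiing1_spec : Claim_equal_product_classifiing1 := by
  intro apple_offers _ _
  unfold Spec_product_classifiing1 product_classifiing1 product_classifiing1_alt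
  simp only [pvRulesRev, List.foldl_cons, List.foldl_nil,
             PySem.List.foldl_append_singleton_eq_map, pvSweep_map]
  simp [List.map_map, Function.comp_def, PySem.Str.toList_lower]
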